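-- pv_equiv track=rewrite | github.com/Batuhankkisa/py-programming | String.py | odev3_soru2_yontem1
-- ===== SOURCE A (Python) =====
-- def odev3_soru2_yontem1(girdi):
--   out_text = ""
--   for eleman in girdi:
--     if eleman == '0':
--       out_text += 'a'
--     if eleman == '1':
--       out_text += 'b'
--     if eleman == '2':
--       out_text += 'c'
--     if eleman == '3':
--       out_text += 'd'
--     if eleman == '4':
--       out_text += 'e'
--     if eleman == '5':
--       out_text += 'f'
--     if eleman == '6':
--       out_text += 'g'
--     if eleman == '7':
--       out_text += 'h'
--     if eleman == '8':
--       out_text += 'i'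
--     if eleman == '9':
--       out_text += 'j'
--   return out_text
-- ===== SOURCE B (Python) =====
-- def odev3_soru2_yontem1(girdi):
--   return ''.join(chr(ord('a') + ord(c) - ord('0')) for c in girdi if '0' <= c <= '9')
-- ===== Notes on version B (the rewrite author's own statement) =====
-- stated objective: simpler
-- what changed: Replaces the ten literal-digit branches and string += accumulation with a single joined comprehension that maps each ASCII digit character to its letter by an arithmetic code-point offset.
import Mathlib
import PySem

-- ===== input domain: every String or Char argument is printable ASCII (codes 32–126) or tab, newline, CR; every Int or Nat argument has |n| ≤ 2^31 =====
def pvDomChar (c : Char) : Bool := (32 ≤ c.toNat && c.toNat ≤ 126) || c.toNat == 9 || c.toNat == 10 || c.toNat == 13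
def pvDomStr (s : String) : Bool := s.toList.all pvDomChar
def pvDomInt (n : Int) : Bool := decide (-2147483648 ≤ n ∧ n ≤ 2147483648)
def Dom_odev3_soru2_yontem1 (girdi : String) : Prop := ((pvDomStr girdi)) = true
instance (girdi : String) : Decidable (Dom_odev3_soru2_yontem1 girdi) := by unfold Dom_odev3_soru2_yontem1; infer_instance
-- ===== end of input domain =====

-- B replaces A's ten literal-digit branches with one arithmetic-offset comprehension; objective: simpler.

-- ===== PORT A =====
-- A's loop body: ten independent 'if eleman == <digit>: out_text += <letter>' statements, in order.
def odev3Soru2StepA (acc : List Char) (eleman : Char) : List Char :=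
  let acc := if eleman = '0' then acc ++ ['a'] else acc
  let acc := if eleman = '1' then acc ++ ['b'] else acc
  let acc := if eleman = '2' then acc ++ ['c'] else acc
  let acc := if eleman = '3' then acc ++ ['d'] else acc
  let acc := if eleman = '4' then acc ++ ['e'] else acc
  let acc := if eleman = '5' then acc ++ ['f'] else acc
  let acc := if eleman = '6' then acc ++ ['g'] else acc
  let acc := if eleman = '7' then acc ++ ['h'] else acc
  let acc := if eleman = '8' then acc ++ ['i'] else acc
  let acc := if eleman = '9' then acc ++ ['j'] else acc
  acc

def odev3_soru2_yontem1 (girdi : String) : String :=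
  String.ofList (girdi.toList.foldl odev3Soru2StepA [])

-- ===== PORT B =====
-- B's per-char mapping: keep c only if '0' <= c <= '9', emit chr(ord('a') + ord(c) - ord('0')).
def odev3Soru2MapB (c : Char) : Option Char :=
  if '0' ≤ c ∧ c ≤ '9' then some (Char.ofNat ('a'.toNat + c.toNat - '0'.toNat)) else none

def odev3_soru2_yontem1_alt (girdi : String) : String :=
  String.ofList (girdi.toList.filterMap odev3Soru2MapB)

-- ===== PRECONDITION & SPEC =====
def Spec_odev3_soru2_yontem1 (girdi : String) (out : String) : Prop := out = odev3_soru2_yontem1_alt girdi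
instance (girdi : String) (out : String) : Decidable (Spec_odev3_soru2_yontem1 girdi out) := by unfold Spec_odev3_soru2_yontem1; infer_instance

-- ===== CLAIM (what is proved, stated in full; the proofs are below) =====
def Claim_equal_odev3_soru2_yontem1 : Prop := ∀ (girdi : String), Dom_odev3_soru2_yontem1 girdi → Spec_odev3_soru2_yontem1 girdi (odev3_soru2_yontem1 girdi)

-- ===== LEMMAS AND PROOFS =====

-- One step of A appends exactly what B's per-char mapping emits.
theorem odev3Soru2_step_char (acc : List Char) (c : Char) :
    odev3Soru2StepA acc c = acc ++ (odev3Soru2MapB c).toList := by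
  by_cases h : 48 ≤ c.toNat ∧ c.toNat ≤ 57
  · obtain ⟨hl, hr⟩ := h
    have hc : c = Char.ofNat c.toNat := (Char.ofNat_toNat c).symm
    rw [hc]
    interval_cases hv : c.toNat <;> simp [odev3Soru2StepA, odev3Soru2MapB]
  · have h0 : c ≠ '0' := by rintro rfl; exact h (by decide)
    have h1 : c ≠ '1' := by rintro rfl; exact h (by decide)
    have h2 : c ≠ '2' := by rintro rfl; exact h (by decide)
    have h3 : c ≠ '3' := by rintro rfl; exact h (by decide)
    have h4 : c ≠ '4' := by rintro rfl; exact h (by decide)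
    have h5 : c ≠ '5' := by rintro rfl; exact h (by decide)
    have h6 : c ≠ '6' := by rintro rfl; exact h (by decide)
    have h7 : c ≠ '7' := by rintro rfl; exact h (by decide)
    have h8 : c ≠ '8' := by rintro rfl; exact h (by decide)
    have h9 : c ≠ '9' := by rintro rfl; exact h (by decide)
    have hrange : ¬ ('0' ≤ c ∧ c ≤ '9') := by
      rintro ⟨hl, hr⟩
      exact h ⟨hl, hr⟩
    simp [odev3Soru2StepA, odev3Soru2MapB, h0, h1, h2, h3, h4, h5, h6, h7, h8, h9, hrange]

theorem odev3Soru2_fold_eq (l : List Char) (acc : List Char) :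
    l.foldl odev3Soru2StepA acc = acc ++ l.filterMap odev3Soru2MapB := by
  induction l generalizing acc with
  | nil => simp
  | cons c t ih =>
    simp only [List.foldl_cons, List.filterMap_cons, ih, odev3Soru2_step_char]
    cases odev3Soru2MapB c <;> simp

-- ===== VERDICT (by name: the statement is the Claim_ definition above) =====
theorem odev3_soru2_yontem1_spec : Claim_equal_odev3_soru2_yontem1 := by
  intro girdi _
  unfold Spec_odev3_soru2_yontem1 odev3_soru2_yontem1 odev3_soru2_yontem1_alt
  rw [odev3Soru2_fold_eq]
  simp
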